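-- pv_equiv track=rewrite | github.com/Drakonkinst/AdventOfCode | 2024/Day24/puzzle2_research.py | get_inputs_for_output
-- ===== SOURCE A (Python) =====
-- from collections import deque, Counter # append(), pop(), popleft()
--
-- def get_inputs_for_output(output_wire, wire_values):
--     q = deque()
--     q.append(output_wire)
--     inputs = set()
--     while len(q):
--         problem_wire = q.pop()
--         if problem_wire in inputs:
--             continue
--         inputs.add(problem_wire)
--         _, gate = wire_values[problem_wire]
--         if gate is not None:
--             input_1, input_2, _ = gate
--             if input_1[0] != 'x' and input_1[0] != 'y':
--                 q.append(input_1)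
--             if input_2[0] != 'x' and input_2[0] != 'y':
--                 q.append(input_2)
--     return inputs
-- ===== SOURCE B (Python) =====
-- def get_inputs_for_output(output_wire, wire_values):
--     # Recursive DFS instead of the explicit deque-based stack loop.
--     # Children are visited in the stack's pop order (input_2 first); the
--     # result is a set, so the visiting order is unobservable anyway.
--     inputs = set()
--
--     def visit(wire):
--         if wire in inputs:
--             return
--         inputs.add(wire)
--         _, gate = wire_values[wire]
--         if gate is not None:
--             input_1, input_2, _ = gate
--             if input_2[0] != 'x' and input_2[0] != 'y':
--                 visit(input_2)
--             if input_1[0] != 'x' and input_1[0] != 'y':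
--                 visit(input_1)
--
--     visit(output_wire)
--     return inputs
-- ===== Notes on version B (the rewrite author's own statement) =====
-- stated objective: alternative
-- what changed: The explicit deque-based stack loop with pop-time visited checks is replaced by a recursive DFS helper visit() that recurses on the gate inputs (the call stack replaces the deque).
import Mathlib
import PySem

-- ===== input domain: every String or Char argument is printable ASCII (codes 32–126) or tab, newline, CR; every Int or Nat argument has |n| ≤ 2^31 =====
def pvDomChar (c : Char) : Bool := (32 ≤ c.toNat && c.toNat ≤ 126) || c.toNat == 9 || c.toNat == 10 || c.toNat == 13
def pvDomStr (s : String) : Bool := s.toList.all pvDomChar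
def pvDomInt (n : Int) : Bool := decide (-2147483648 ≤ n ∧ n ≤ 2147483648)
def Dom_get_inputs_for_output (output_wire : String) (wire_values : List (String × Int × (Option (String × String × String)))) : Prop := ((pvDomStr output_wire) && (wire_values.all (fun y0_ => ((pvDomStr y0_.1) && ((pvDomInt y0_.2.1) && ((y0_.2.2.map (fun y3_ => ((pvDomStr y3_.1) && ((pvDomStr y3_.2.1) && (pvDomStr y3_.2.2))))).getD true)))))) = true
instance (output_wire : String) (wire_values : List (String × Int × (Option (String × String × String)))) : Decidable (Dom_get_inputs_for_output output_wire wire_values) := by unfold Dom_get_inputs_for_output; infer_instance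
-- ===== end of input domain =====

-- ===== PORT A =====
-- B re-implements A's explicit deque-based stack loop as a recursive DFS (different
-- decomposition, same cost); the theorems below prove the returned sets are equal
-- (element lists identical) on all inputs of the domain.

-- helper for the guard `wire[0] != 'x' and wire[0] != 'y'` (same expression in both sources);
-- PySem.Str.pyGet? s 0 = none iff s = "", where Python raises IndexError (excluded by Pre_);
-- the port then lets the guard hold.
def pvNotXY (s : String) : Bool :=
  PySem.Str.pyGet? s 0 != some 'x' && PySem.Str.pyGet? s 0 != some 'y'

-- termination measure: number of dict keys not yet in the visited set
def pvKeysNot (wv : List (String × Int × (Option (String × String × String)))) (inputs : List String) : Nat :=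
  (wv.map Prod.fst).countP (fun k => !(PySem.Set.contains inputs k))

lemma countP_lt_of_mem {α} {l : List α} {p p' : α → Bool} (hle : ∀ x, p' x = true → p x = true)
    {w} (hw : w ∈ l) (hpw : p w = true) (hp'w : p' w = false) : l.countP p' < l.countP p := by
  induction l with
  | nil => cases hw
  | cons a t ih =>
    rcases List.mem_cons.mp hw with rfl | hwt
    · simp [hpw, hp'w]
      exact List.countP_mono_left (fun x _ => hle x)
    · have hle' : List.countP p' t ≤ List.countP p t := List.countP_mono_left (fun x _ => hle x)
      have := ih hwt
      by_cases hpa : p' a = true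
      · simp [hpa, hle a hpa]; omega
      · simp [Bool.eq_false_iff.mpr hpa]
        simp [List.countP_cons]; omega

lemma pvContains_add_of (s : List String) (w x : String) (h : PySem.Set.contains s x = true) :
    PySem.Set.contains (PySem.Set.add s w) x = true := by
  rw [PySem.Set.contains_iff] at h ⊢
  rw [PySem.Set.mem_add]; exact Or.inl h

lemma pvKeysNot_mono (wv : List (String × Int × (Option (String × String × String)))) {s t : List String}
    (h : ∀ x, PySem.Set.contains s x = true → PySem.Set.contains t x = true) :
    pvKeysNot wv t ≤ pvKeysNot wv s := by
  apply List.countP_mono_left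
  intro x _ hx
  simp only [Bool.not_eq_eq_eq_not, Bool.not_true] at hx ⊢
  by_contra hc
  have := h x (by revert hc; cases PySem.Set.contains s x <;> simp)
  rw [this] at hx; simp at hx

lemma pvKeysNot_add_le (wv : List (String × Int × (Option (String × String × String)))) (s : List String) (w : String) :
    pvKeysNot wv (PySem.Set.add s w) ≤ pvKeysNot wv s :=
  pvKeysNot_mono wv (pvContains_add_of s w)

lemma pvKeysNot_add_lt (wv : List (String × Int × (Option (String × String × String)))) (s : List String) (w : String)
    (hw : w ∈ wv.map Prod.fst) (hs : PySem.Set.contains s w = false) :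
    pvKeysNot wv (PySem.Set.add s w) < pvKeysNot wv s := by
  unfold pvKeysNot
  refine countP_lt_of_mem ?_ hw ?_ ?_
  · intro x hx
    simp only [Bool.not_eq_eq_eq_not, Bool.not_true] at hx ⊢
    by_contra hc
    have := pvContains_add_of s w x (by revert hc; cases PySem.Set.contains s x <;> simp)
    rw [this] at hx; simp at hx
  · show (!(PySem.Set.contains s w)) = true
    rw [hs]; rfl
  · have hc : PySem.Set.contains (PySem.Set.add s w) w = true := by
      rw [PySem.Set.contains_iff, PySem.Set.mem_add]; exact Or.inr rfl
    show (!(PySem.Set.contains (PySem.Set.add s w) w)) = false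
    rw [hc]; rfl

lemma pvKeysNot_get?_mem (wv : List (String × Int × (Option (String × String × String)))) (w : String)
    {v} (h : (PySem.Dict.ofList wv).get? w = some v) : w ∈ wv.map Prod.fst := by
  have hk : w ∈ (PySem.Dict.ofList wv).keys := by
    by_contra hk
    rw [← PySem.Dict.get?_eq_none_iff_not_mem_keys] at hk
    rw [hk] at h; cases h
  -- keys of ofList are the first occurrences of the input list's keys
  have hkeys : (PySem.Dict.ofList wv).keys
      = PySem.Set.update (PySem.Dict.empty : PySem.Dict String (Int × Option (String × String × String))).keys (wv.map Prod.fst) := by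
    show (List.foldl (fun d p => d.insert p.1 p.2) PySem.Dict.empty wv).keys = _
    rw [← PySem.Dict.keys_foldl_insert_key wv Prod.fst (fun d p => p.2) PySem.Dict.empty]
  rw [hkeys] at hk
  simpa [PySem.Set.update_nil_left, PySem.Set.mem_ofList] using hk

lemma pvKeysNot_sub (wv : List (String × Int × (Option (String × String × String)))) (s : List String)
    (y : {out : List String // ∀ x, PySem.Set.contains s x = true → PySem.Set.contains out x = true}) :
    pvKeysNot wv y.val ≤ pvKeysNot wv s := pvKeysNot_mono wv y.property

-- A's while-loop over the deque; the deque is a Lean list with its TOP at the head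
-- (q.append = cons, q.pop() = take the head).  The dict is PySem.Dict.ofList wire_values
-- (Python dict semantics: a duplicated key keeps its last value).  When
-- `wire_values[problem_wire]` has no entry Python raises KeyError (excluded by Pre_);
-- the port continues with no pushes.
def pvLoopA (wv : List (String × Int × (Option (String × String × String)))) :
    List String → List String → List String
  | [], inputs => inputs
  | w :: q, inputs =>
    if PySem.Set.contains inputs w then pvLoopA wv q inputs
    else
      let inputs' := PySem.Set.add inputs w
      match h : (PySem.Dict.ofList wv).get? w with
      | none => pvLoopA wv q inputs'
      | some (_, none) => pvLoopA wv q inputs'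
      | some (_, some (i1, i2, _)) =>
        let q1 := if pvNotXY i1 then i1 :: q else q
        let q2 := if pvNotXY i2 then i2 :: q1 else q1
        pvLoopA wv q2 inputs'
  termination_by q inputs => 2 * pvKeysNot wv inputs + q.length
  decreasing_by
  · simp only [List.length_cons]; omega
  · have := pvKeysNot_add_le wv inputs w; simp only [List.length_cons]; omega
  · have := pvKeysNot_add_le wv inputs w; simp only [List.length_cons]; omega
  · have hlt := pvKeysNot_add_lt wv inputs w (pvKeysNot_get?_mem wv w h)
      (Bool.not_eq_true _ ▸ (by assumption : ¬ PySem.Set.contains inputs w = true))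
    split_ifs <;> simp only [List.length_cons] <;> omega

def get_inputs_for_output (output_wire : String) (wire_values : List (String × Int × (Option (String × String × String)))) : List String :=
  pvLoopA wire_values [output_wire] PySem.Set.empty

-- ===== PORT B =====
-- B's recursive `visit`, with the invariant "the visited set only grows" bundled in
-- (needed for termination).  As in A's port, a missing key (Python: KeyError, excluded
-- by Pre_) stops the descent for that wire.
def pvVisit (wv : List (String × Int × (Option (String × String × String))))
    (inputs : List String) (w : String) :
    {out : List String // ∀ x, PySem.Set.contains inputs x = true → PySem.Set.contains out x = true} :=
  if PySem.Set.contains inputs w then ⟨inputs, fun _ hx => hx⟩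
  else
    let inputs' := PySem.Set.add inputs w
    have hsub : ∀ x, PySem.Set.contains inputs x = true → PySem.Set.contains inputs' x = true :=
      pvContains_add_of inputs w
    match h : (PySem.Dict.ofList wv).get? w with
    | none => ⟨inputs', hsub⟩
    | some (_, none) => ⟨inputs', hsub⟩
    | some (_, some (i1, i2, _)) =>
      let s2 : {out : List String // ∀ x, PySem.Set.contains inputs' x = true → PySem.Set.contains out x = true} :=
        if pvNotXY i2 then pvVisit wv inputs' i2 else ⟨inputs', fun _ hx => hx⟩
      let s1 : {out : List String // ∀ x, PySem.Set.contains s2.val x = true → PySem.Set.contains out x = true} :=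
        if pvNotXY i1 then pvVisit wv s2.val i1 else ⟨s2.val, fun _ hx => hx⟩
      ⟨s1.val, fun x hx => s1.property x (s2.property x (hsub x hx))⟩
  termination_by pvKeysNot wv inputs
  decreasing_by
  · exact pvKeysNot_add_lt wv inputs w (pvKeysNot_get?_mem wv w h)
      (Bool.not_eq_true _ ▸ (by assumption : ¬ PySem.Set.contains inputs w = true))
  · have h2 : pvKeysNot wv inputs' < pvKeysNot wv inputs := pvKeysNot_add_lt wv inputs w (pvKeysNot_get?_mem wv w h)
      (Bool.not_eq_true _ ▸ (by assumption : ¬ PySem.Set.contains inputs w = true))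
    refine lt_of_le_of_lt ?_ h2
    split
    · exact pvKeysNot_sub wv _ _
    · exact le_refl _

def get_inputs_for_output_alt (output_wire : String) (wire_values : List (String × Int × (Option (String × String × String)))) : List String :=
  (pvVisit wire_values PySem.Set.empty output_wire).val

-- ===== PRECONDITION & SPEC =====
-- a wire is safe for A to process when popped: a key of the dict, and — when it has a
-- gate — both gate-input names nonempty (else Python raises IndexError on wire[0])
def pvOKwire (d : PySem.Dict String (Int × Option (String × String × String))) (w : String) : Bool :=
  match d.get? w with
  | none => false
  | some (_, none) => true
  | some (_, some (i1, i2, _)) => i1 != "" && i2 != ""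

-- the gate inputs of w that A pushes onto its stack (pvNotXY "" holds; the parent then
-- already fails pvOKwire, so Pre_ is false there as it must be)
def pvSuccs (d : PySem.Dict String (Int × Option (String × String × String))) (w : String) : List String :=
  match d.get? w with
  | some (_, some (i1, i2, _)) =>
      (if pvNotXY i1 then [i1] else []) ++ (if pvNotXY i2 then [i2] else [])
  | _ => []

-- one round of the graph closure: add every pushed gate input of every wire collected so far
def pvCloseStep (d : PySem.Dict String (Int × Option (String × String × String))) (S : List String) : List String :=
  S.foldl (fun acc w => PySem.Set.update acc (pvSuccs d w)) S

-- n rounds of pvCloseStep (plain structural recursion)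
def pvCloseIter (d : PySem.Dict String (Int × Option (String × String × String))) : Nat → List String → List String
  | 0, S => S
  | n + 1, S => pvCloseIter d n (pvCloseStep d S)

-- Pre_ excludes exactly the inputs on which Python A raises: it computes the set of wires
-- reachable from output_wire along pushed gate inputs (a graph closure; 2·|wire_values|+1
-- rounds reach the fixpoint since the closure holds at most that many distinct names) and
-- requires each reachable wire to be a dict key with nonempty gate-input names — precisely
-- the condition for A to finish without KeyError or IndexError.
def Pre_get_inputs_for_output (output_wire : String) (wire_values : List (String × Int × (Option (String × String × String)))) : Prop :=
  ((pvCloseIter (PySem.Dict.ofList wire_values) (2 * wire_values.length + 1) [output_wire]).all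
      (pvOKwire (PySem.Dict.ofList wire_values))) = true
instance (output_wire : String) (wire_values : List (String × Int × (Option (String × String × String)))) : Decidable (Pre_get_inputs_for_output output_wire wire_values) := by unfold Pre_get_inputs_for_output; infer_instance

def pvWitness_get_inputs_for_output : String × (List (String × Int × (Option (String × String × String)))) :=
  ("z00", [("z00", 0, some ("x00", "y00", "AND"))])

def Spec_get_inputs_for_output (output_wire : String) (wire_values : List (String × Int × (Option (String × String × String)))) (out : List String) : Prop := out = get_inputs_for_output_alt output_wire wire_values
instance (output_wire : String) (wire_values : List (String × Int × (Option (String × String × String)))) (out : List String) : Decidable (Spec_get_inputs_for_output output_wire wire_values out) := by unfold Spec_get_inputs_for_output; infer_instance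

-- ===== CLAIM (what is proved, stated in full; the proofs are below) =====
def Claim_equal_get_inputs_for_output : Prop := ∀ (output_wire : String) (wire_values : List (String × Int × (Option (String × String × String)))), Dom_get_inputs_for_output output_wire wire_values → Pre_get_inputs_for_output output_wire wire_values → Spec_get_inputs_for_output output_wire wire_values (get_inputs_for_output output_wire wire_values)

-- ===== LEMMAS AND PROOFS =====
-- popping w from the stack and then running A's loop is running it after B's visit of w
lemma pvLoop_visit (wv : List (String × Int × (Option (String × String × String)))) :
    ∀ (n : Nat) (inputs : List String), pvKeysNot wv inputs ≤ n →
    ∀ (q : List String) (w : String),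
      pvLoopA wv (w :: q) inputs = pvLoopA wv q (pvVisit wv inputs w).val := by
  intro n
  induction n using Nat.strong_induction_on with
  | _ n ih =>
    intro inputs hn q w
    rw [pvLoopA, pvVisit]
    by_cases hw : PySem.Set.contains inputs w = true
    · simp only [if_pos hw]
    · have hwf : PySem.Set.contains inputs w = false := by
        cases hc : PySem.Set.contains inputs w
        · rfl
        · exact absurd hc hw
      simp only [if_neg hw]
      split
      · rfl
      · rfl
      · rename_i v1 i1 i2 op heq
        have hmem : w ∈ wv.map Prod.fst := pvKeysNot_get?_mem wv w heq
        have hlt : pvKeysNot wv (PySem.Set.add inputs w) < pvKeysNot wv inputs :=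
          pvKeysNot_add_lt wv inputs w hmem hwf
        have ih1 : ∀ q' w', pvLoopA wv (w' :: q') (PySem.Set.add inputs w)
            = pvLoopA wv q' (pvVisit wv (PySem.Set.add inputs w) w').val :=
          fun q' w' => ih (pvKeysNot wv (PySem.Set.add inputs w)) (by omega) _ (le_refl _) q' w'
        have hle2 : pvKeysNot wv (pvVisit wv (PySem.Set.add inputs w) i2).val
            ≤ pvKeysNot wv (PySem.Set.add inputs w) := pvKeysNot_sub wv _ _
        have ih2 : ∀ q' w', pvLoopA wv (w' :: q') (pvVisit wv (PySem.Set.add inputs w) i2).val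
            = pvLoopA wv q' (pvVisit wv (pvVisit wv (PySem.Set.add inputs w) i2).val w').val :=
          fun q' w' => ih (pvKeysNot wv (pvVisit wv (PySem.Set.add inputs w) i2).val) (by omega) _ (le_refl _) q' w'
        by_cases h2 : pvNotXY i2 = true <;> by_cases h1 : pvNotXY i1 = true
        · rw [if_pos h2, if_pos h1, ih1, ih2]; simp only [if_pos h1]
          conv_rhs => rw [if_pos h2]
        · rw [if_pos h2, if_neg h1, ih1]; simp only [if_neg h1, if_pos h2]
        · rw [if_neg h2, if_pos h1, ih1]; simp only [if_pos h1]
          conv_rhs => rw [if_neg h2]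
        · rw [if_neg h2, if_neg h1]; simp only [if_neg h1, if_neg h2]

-- ===== VERDICT (by name: the statement is the Claim_ definition above) =====
theorem get_inputs_for_output_spec : Claim_equal_get_inputs_for_output := by
  intro output_wire wire_values _ _
  unfold Spec_get_inputs_for_output get_inputs_for_output get_inputs_for_output_alt
  rw [pvLoop_visit wire_values (pvKeysNot wire_values PySem.Set.empty) PySem.Set.empty
      (le_refl _) [] output_wire]
  rw [pvLoopA]
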